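-- pv_equiv track=rewrite | github.com/lbertoncello/GeneticAlg | objetiva.py | fobj
-- ===== SOURCE A (Python) =====
-- def fobj(P, M):
--     s = 0
--     c_ant = P[0]
--     for c in P[1:]:
--         s+=M[c_ant-1][c-1]
--         c_ant = c
--     s+=M[P[-1]-1][P[0]-1]
--     return s
-- ===== SOURCE B (Python) =====
-- def fobj(P, M):
--     # Divide and conquer: cost of the open path over Q by splitting Q in half,
--     # plus the closing wrap-around edge.
--     def path(Q):
--         if len(Q) < 2:
--             return 0
--         m = len(Q) // 2
--         return path(Q[:m]) + path(Q[m:]) + M[Q[m - 1] - 1][Q[m] - 1]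
--     return path(P) + M[P[-1] - 1][P[0] - 1]
-- ===== Notes on version B (the rewrite author's own statement) =====
-- stated objective: alternative
-- what changed: B computes the open-path cost by divide and conquer -- recursively splitting the tour in half and adding the one edge that joins the halves -- then adds the closing edge, instead of A's left-to-right accumulator scan with a previous-city variable.
import Mathlib
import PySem

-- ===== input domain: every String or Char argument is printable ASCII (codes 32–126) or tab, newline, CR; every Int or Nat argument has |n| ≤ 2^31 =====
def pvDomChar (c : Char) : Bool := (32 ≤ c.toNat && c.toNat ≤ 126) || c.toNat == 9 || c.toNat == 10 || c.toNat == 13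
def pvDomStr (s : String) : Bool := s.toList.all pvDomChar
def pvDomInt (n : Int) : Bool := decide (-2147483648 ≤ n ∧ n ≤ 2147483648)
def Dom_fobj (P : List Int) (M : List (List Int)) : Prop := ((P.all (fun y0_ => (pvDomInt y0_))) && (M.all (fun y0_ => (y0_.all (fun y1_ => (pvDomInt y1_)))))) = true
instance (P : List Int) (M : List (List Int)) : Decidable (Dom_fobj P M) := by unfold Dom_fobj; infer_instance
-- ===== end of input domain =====

-- B computes the open-path cost by divide and conquer (split the tour in half, add the joining
-- edge) and then adds the closing edge, instead of A's left-to-right accumulator scan (objective: alternative).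

-- M[a-1][b-1], total via defaults; Pre_fobj guarantees every lookup is in range (Python wrap rules)
def pvCost (M : List (List Int)) (a b : Int) : Int :=
  PySem.List.pyGetD (PySem.List.pyGetD M (a - 1) []) (b - 1) 0

-- ===== PORT A =====
def fobj (P : List Int) (M : List (List Int)) : Int :=
  let c0 := PySem.List.pyGetD P 0 0                 -- c_ant = P[0]  (IndexError on [] excluded by Pre_)
  let st := (PySem.List.slice P (some 1) none).foldl   -- for c in P[1:]
      (fun (st : Int × Int) c => (st.1 + pvCost M st.2 c, c)) ((0 : Int), c0)
  st.1 + pvCost M (PySem.List.pyGetD P (-1) 0) c0   -- s += M[P[-1]-1][P[0]-1]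

-- ===== PORT B =====
-- path(Q): Q[:m] / Q[m:] with the natural midpoint m = len(Q)//2 are exactly take/drop
-- (PySem.List.slice_to_natCast / slice_from_natCast); Q[m-1], Q[m] are in range when 2 ≤ len(Q)
def pathCost (M : List (List Int)) (Q : List Int) : Int :=
  if Q.length < 2 then 0
  else  -- m = len(Q) // 2, inlined (pure)
    pathCost M (Q.take (Q.length / 2)) + pathCost M (Q.drop (Q.length / 2)) +
      pvCost M (PySem.List.pyGetD Q ((Q.length / 2 : Nat) - 1 : Int) 0)
        (PySem.List.pyGetD Q (Q.length / 2 : Nat) 0)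
termination_by Q.length
decreasing_by
  · simp only [List.length_take]; omega
  · simp only [List.length_drop]; omega

def fobj_alt (P : List Int) (M : List (List Int)) : Int :=
  pathCost M P + pvCost M (PySem.List.pyGetD P (-1) 0) (PySem.List.pyGetD P 0 0)

-- ===== PRECONDITION & SPEC =====
-- both matrix lookups of an edge succeed under Python's (possibly negative) indexing
def pvEdgeOk (M : List (List Int)) (a b : Int) : Bool :=
  match PySem.List.pyGet? M (a - 1) with
  | none => false
  | some row => (PySem.List.pyGet? row (b - 1)).isSome

-- exactly the inputs where Python A returns: nonempty tour and every cyclic edge indexes M in range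
def Pre_fobj (P : List Int) (M : List (List Int)) : Prop :=
  P ≠ [] ∧ ∀ ab ∈ P.zip (P.drop 1 ++ P.take 1), pvEdgeOk M ab.1 ab.2 = true
instance (P : List Int) (M : List (List Int)) : Decidable (Pre_fobj P M) := by
  unfold Pre_fobj; infer_instance
def pvWitness_fobj : List Int × List (List Int) := ([1, 2], [[0, 5], [7, 0]])

def Spec_fobj (P : List Int) (M : List (List Int)) (out : Int) : Prop := out = fobj_alt P M
instance (P : List Int) (M : List (List Int)) (out : Int) : Decidable (Spec_fobj P M out) := by unfold Spec_fobj; infer_instance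

-- ===== CLAIM (what is proved, stated in full; the proofs are below) =====
def Claim_equal_fobj : Prop := ∀ (P : List Int) (M : List (List Int)), Dom_fobj P M → Pre_fobj P M → Spec_fobj P M (fobj P M)

-- ===== LEMMAS AND PROOFS =====

-- the list of consecutive (interior) edges of a path, and their total cost
def pvEdgeSum (M : List (List Int)) (Q : List Int) : Int :=
  ((Q.zip (Q.drop 1)).map (fun ab => pvCost M ab.1 ab.2)).sum

theorem getLastQ_cons (c c0 : Int) (cs : List Int) :
    ((c :: cs).getLast?).getD c0 = cs.getLast?.getD c := by
  induction cs generalizing c c0 with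
  | nil => rfl
  | cons d ds ih => simp [List.getLast?_cons_cons, ih]

-- A's loop state: running sum = fold of edge costs over consecutive pairs; c_ant = last element seen
theorem fobj_loop (M : List (List Int)) (L : List Int) (s c0 : Int) :
    L.foldl (fun (st : Int × Int) c => (st.1 + pvCost M st.2 c, c)) (s, c0) =
      (((c0 :: L).zip L).foldl (fun t ab => t + pvCost M ab.1 ab.2) s, L.getLastD c0) := by
  induction L generalizing s c0 with
  | nil => simp
  | cons c cs ih => simp [List.zip_cons_cons, ih (s + pvCost M c0 c) c, getLastQ_cons]

theorem getLast_cons_eq_getLastD (p0 : Int) (rest : List Int) (h : p0 :: rest ≠ []) :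
    (p0 :: rest).getLast h = rest.getLastD p0 := by
  induction rest generalizing p0 with
  | nil => simp
  | cons c cs ih =>
    rw [List.getLast_cons (by simp), ih c (by simp)]
    cases cs with
    | nil => rfl
    | cons d ds => simp [List.getLastD, List.getLast_cons]

-- splitting a path splits its edge list: edges(A++B) = edges A ++ joining edge ++ edges B
theorem zip_drop_append (B : List Int) (hB : B ≠ []) :
    ∀ (A : List Int) (hA : A ≠ []),
      (A ++ B).zip ((A ++ B).drop 1) =
        A.zip (A.drop 1) ++ (A.getLast hA, B.head hB) :: B.zip (B.drop 1) := by
  intro A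
  induction A with
  | nil => intro hA; exact absurd rfl hA
  | cons a as ih =>
    intro _
    cases as with
    | nil =>
      obtain ⟨b, bs, rfl⟩ := List.exists_cons_of_ne_nil hB
      simp [List.zip_cons_cons]
    | cons a2 as2 =>
      have := ih (by simp)
      simp only [List.cons_append, List.drop_succ_cons, List.drop_zero] at this ⊢
      simp only [List.zip_cons_cons, this]
      simp [List.getLast_cons]

theorem pvEdgeSum_split (M : List (List Int)) (A B : List Int) (hA : A ≠ []) (hB : B ≠ []) :
    pvEdgeSum M (A ++ B) =
      pvEdgeSum M A + pvCost M (A.getLast hA) (B.head hB) + pvEdgeSum M B := by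
  unfold pvEdgeSum
  rw [zip_drop_append B hB A hA]
  simp [List.map_append, List.sum_append]
  ring

-- divide and conquer computes exactly the total interior-edge cost
theorem pathCost_eq (M : List (List Int)) :
    ∀ (n : Nat) (Q : List Int), Q.length ≤ n → pathCost M Q = pvEdgeSum M Q := by
  intro n
  induction n with
  | zero =>
    intro Q hQ
    have : Q = [] := List.eq_nil_of_length_eq_zero (Nat.le_zero.mp hQ)
    subst this; rw [pathCost]; simp [pvEdgeSum]
  | succ n ih =>
    intro Q hQ
    rw [pathCost]
    by_cases h : Q.length < 2
    · rw [if_pos h]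
      match Q, h with
      | [], _ => simp [pvEdgeSum]
      | [a], _ => simp [pvEdgeSum]
    · rw [if_neg h]
      have hlen : 2 ≤ Q.length := Nat.not_lt.mp h
      generalize hm : Q.length / 2 = m
      have hm1 : 1 ≤ m := by omega
      have hmlt : m < Q.length := by omega
      have htake : (Q.take m).length = m := by simp; omega
      have hdrop : (Q.drop m).length = Q.length - m := by simp
      have hAne : Q.take m ≠ [] := by intro hc; rw [hc] at htake; simp at htake; omega
      have hBne : Q.drop m ≠ [] := by intro hc; rw [hc] at hdrop; simp at hdrop; omega
      have h1 : pathCost M (Q.take m) = pvEdgeSum M (Q.take m) := ih _ (by omega)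
      have h2 : pathCost M (Q.drop m) = pvEdgeSum M (Q.drop m) := ih _ (by omega)
      have hg1 : PySem.List.pyGetD Q ((m : Int) - 1) 0 = (Q.take m).getLast hAne := by
        rw [PySem.List.pyGetD_eq_getElem Q 0 (by omega) (by omega),
          List.getLast_eq_getElem, List.getElem_take]
        congr 1
        omega
      have hg2 : PySem.List.pyGetD Q ((m : Nat) : Int) 0 = (Q.drop m).head hBne := by
        rw [PySem.List.pyGetD_eq_getElem Q 0 (by omega) (by omega),
          List.head_drop]
        simp
      rw [h1, h2, hg1, hg2]
      conv_rhs => rw [← List.take_append_drop m Q]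
      rw [pvEdgeSum_split M _ _ hAne hBne]
      ring

-- ===== VERDICT (by name: the statement is the Claim_ definition above) =====
theorem fobj_spec : Claim_equal_fobj := by
  intro P M _ hPre
  obtain ⟨hne, -⟩ := hPre
  obtain ⟨p0, rest, rfl⟩ := List.exists_cons_of_ne_nil hne
  show _ = _
  have hs1 : PySem.List.slice (p0 :: rest) (some 1) none = rest := by
    rw [PySem.List.slice_from_one]; rfl
  simp only [fobj, fobj_alt, hs1]
  rw [fobj_loop, PySem.List.foldl_add,
    pathCost_eq M (p0 :: rest).length _ le_rfl]
  simp only [pvEdgeSum, List.drop_succ_cons, List.drop_zero, zero_add]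
  rw [PySem.List.pyGetD_neg_one _ _ hne, getLast_cons_eq_getLastD,
    PySem.List.pyGetD_zero_cons]
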